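-- pv_equiv track=rewrite | github.com/quirk-finder/texgrep | backend/search/opensearch_client.py | _strip_regex_syntax
-- ===== SOURCE A (Python) =====
-- def _strip_regex_syntax(pattern: str) -> str:
--     result: list[str] = []
--     escape = False
--     for char in pattern:
--         if escape:
--             result.append(char)
--             escape = False
--             continue
--         if char == "\\":
--             result.append("\\")
--             escape = True
--             continue
--         if char in ".*+?[](){}|":
--             result.append(" ")
--         else:
--             result.append(char)
--     cleaned = "".join(result)
--     return " ".join(cleaned.split())
-- ===== SOURCE B (Python) =====
-- import re
--
-- _RE = re.compile(r'\\.?|[.*+?\[\](){}|]', re.DOTALL)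
--
-- def _strip_regex_syntax(pattern: str) -> str:
--     cleaned = _RE.sub(lambda m: m.group(0) if m.group(0).startswith("\\") else " ", pattern)
--     return " ".join(cleaned.split())
-- ===== Notes on version B (the rewrite author's own statement) =====
-- stated objective: idiomatic
-- what changed: Replaces the explicit escape-flag character loop with a single precompiled re.sub whose alternation tries the escape pair first (keeping it) and turns bare metacharacters into spaces, followed by the same split/join whitespace normalization.
import Mathlib
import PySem

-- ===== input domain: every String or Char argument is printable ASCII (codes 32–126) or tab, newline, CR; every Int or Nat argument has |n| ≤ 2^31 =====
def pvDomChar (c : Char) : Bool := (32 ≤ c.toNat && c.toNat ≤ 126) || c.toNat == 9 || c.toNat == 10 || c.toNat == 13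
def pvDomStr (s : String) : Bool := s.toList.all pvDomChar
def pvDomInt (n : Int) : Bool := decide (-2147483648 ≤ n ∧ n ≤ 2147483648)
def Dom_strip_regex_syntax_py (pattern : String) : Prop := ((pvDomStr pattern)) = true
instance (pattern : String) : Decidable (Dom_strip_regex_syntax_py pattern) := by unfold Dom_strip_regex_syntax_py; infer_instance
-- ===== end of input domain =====

-- B replaces A's per-character escape-flag state machine by a single regex substitution
-- (re.sub with escape-pair alternative first); objective: idiomatic, same return value.

-- ===== PORT A =====
-- A's loop over the pattern with its `escape` flag, as the obvious structural recursion;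
-- the `escape` boolean is the loop state, branches in A's order.
def pvStripLoopA : Bool → List Char → List Char
  | _, [] => []
  | true, c :: rest => c :: pvStripLoopA false rest
  | false, c :: rest =>
    if c = '\\' then '\\' :: pvStripLoopA true rest
    else if c ∈ ".*+?[](){}|".toList then ' ' :: pvStripLoopA false rest
    else c :: pvStripLoopA false rest

def strip_regex_syntax_py (pattern : String) : String :=
  let cleaned := String.mk (pvStripLoopA false pattern.toList)
  PySem.Str.join " " (PySem.Str.split₀ cleaned)

-- ===== PORT B =====
-- Hand port of Source B's re.sub scan (exact here): the regex r'\\.?|[.*+?\[\](){}|]' with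
-- re.DOTALL scans left to right, trying the escape alternative first — a backslash plus an
-- optional following character (any character, DOTALL) is kept unchanged; otherwise a
-- metacharacter becomes ' '; unmatched characters are copied through.
def pvReSubB : List Char → List Char
  | [] => []
  | ['\\'] => ['\\']
  | '\\' :: c :: rest => '\\' :: c :: pvReSubB rest
  | c :: rest => (if c ∈ ".*+?[](){}|".toList then ' ' else c) :: pvReSubB rest

def strip_regex_syntax_py_alt (pattern : String) : String :=
  let cleaned := String.mk (pvReSubB pattern.toList)
  PySem.Str.join " " (PySem.Str.split₀ cleaned)

-- ===== PRECONDITION & SPEC =====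
def Spec_strip_regex_syntax_py (pattern : String) (out : String) : Prop := out = strip_regex_syntax_py_alt pattern
instance (pattern : String) (out : String) : Decidable (Spec_strip_regex_syntax_py pattern out) := by unfold Spec_strip_regex_syntax_py; infer_instance

-- ===== CLAIM (what is proved, stated in full; the proofs are below) =====
def Claim_equal_strip_regex_syntax_py : Prop := ∀ (pattern : String), Dom_strip_regex_syntax_py pattern → Spec_strip_regex_syntax_py pattern (strip_regex_syntax_py pattern)

-- ===== LEMMAS AND PROOFS =====
theorem pvStripLoopA_eq_pvReSubB (l : List Char) : pvStripLoopA false l = pvReSubB l := by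
  induction l using pvReSubB.induct with
  | case1 => rfl
  | case2 => rfl
  | case3 c rest ih => simp [pvStripLoopA, pvReSubB, ih]
  | case4 c rest h1 h2 ih =>
    have hc : c ≠ '\\' := by
      intro h; subst h; cases rest with
      | nil => exact h1 rfl rfl
      | cons d tl => exact h2 d tl rfl rfl
    simp only [pvStripLoopA, pvReSubB, hc, if_false, ih]
    split <;> rfl

-- ===== VERDICT (by name: the statement is the Claim_ definition above) =====
theorem strip_regex_syntax_py_spec : Claim_equal_strip_regex_syntax_py := by
  intro pattern _
  unfold Spec_strip_regex_syntax_py strip_regex_syntax_py strip_regex_syntax_py_alt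
  rw [pvStripLoopA_eq_pvReSubB]
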